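-- pv_equiv track=rewrite | github.com/7-ZPUs/Docs | .github/scripts/analisi_glossario.py | estrai_contenuto_graffe
-- ===== SOURCE A (Python) =====
-- def estrai_contenuto_graffe(riga, start_keyword):
--     """Estrae il contenuto bilanciato tra graffe."""
--     termini = []
--     cursore = 0
--     keyword = start_keyword.replace('\\', '')
--
--     while True:
--         start_index = riga.find(keyword, cursore)
--         if start_index == -1:
--             break
--
--         content_start = start_index + len(keyword)
--         current_pos = content_start
--         parentesi_aperte = 1
--
--         while current_pos < len(riga) and parentesi_aperte > 0:
--             char = riga[current_pos]
--             if char == '{':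
--                 parentesi_aperte += 1
--             elif char == '}':
--                 parentesi_aperte -= 1
--             current_pos += 1
--
--         if parentesi_aperte == 0:
--             raw_term = riga[content_start : current_pos - 1]
--             termini.append(raw_term)
--             cursore = current_pos
--         else:
--             break
--     return termini
-- ===== SOURCE B (Python) =====
-- def estrai_contenuto_graffe(riga, start_keyword):
--     """Estrae il contenuto bilanciato tra graffe.
--
--     Different algorithm: one backward pass precomputes, for every position,
--     the index where a brace region opened there (depth 1) closes; the main
--     loop then just looks the close position up instead of rescanning."""
--     keyword = start_keyword.replace('\\', '')
--     n = len(riga)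
--     # close_at[i] = smallest j >= i such that a region starting at i with
--     # depth 1 is closed just after j (i.e. relative depth first hits 0), or None
--     close_at = [None] * (n + 1)
--     nearest = {}  # relative depth value -> smallest index to the right seen so far
--     q = 0  # running relative depth at boundary j+1 (measured from the end)
--     for j in range(n - 1, -1, -1):
--         nearest[q] = j
--         ch = riga[j]
--         if ch == '{':
--             qj = q - 1
--         elif ch == '}':
--             qj = q + 1
--         else:
--             qj = q
--         close_at[j] = nearest.get(qj - 1)
--         q = qj
--
--     termini = []
--     cursore = 0
--     while True:
--         s = riga.find(keyword, cursore)
--         if s == -1: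
--             break
--         cs = s + len(keyword)
--         j = close_at[cs]
--         if j is None:
--             break
--         termini.append(riga[cs:j])
--         cursore = j + 1
--     return termini
-- ===== Notes on version B (the rewrite author's own statement) =====
-- stated objective: alternative
-- what changed: Replaces A's per-match inner brace-depth rescanning loop by a single backward preprocessing pass that builds a close-position table (via a relative-depth dictionary), so the main loop only performs a table lookup per keyword match.
import Mathlib
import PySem

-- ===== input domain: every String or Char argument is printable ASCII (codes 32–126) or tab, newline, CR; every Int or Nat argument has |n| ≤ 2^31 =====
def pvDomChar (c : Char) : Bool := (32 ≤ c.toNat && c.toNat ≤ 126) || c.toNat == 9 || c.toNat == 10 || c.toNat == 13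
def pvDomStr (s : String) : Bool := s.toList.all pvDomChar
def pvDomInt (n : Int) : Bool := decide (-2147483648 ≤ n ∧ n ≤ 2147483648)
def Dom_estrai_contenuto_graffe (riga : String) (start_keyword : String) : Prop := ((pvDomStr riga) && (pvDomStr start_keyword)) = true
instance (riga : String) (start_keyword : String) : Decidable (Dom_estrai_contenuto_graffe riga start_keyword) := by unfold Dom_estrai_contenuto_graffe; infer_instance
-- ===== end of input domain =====

-- B precomputes a brace close-position table in one backward pass, so the main loop does a
-- lookup per keyword match instead of rescanning to the closing brace; same return value.

-- ===== PORT A =====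
-- inner while loop of A: advance current_pos while parentesi_aperte > 0
def pvScanA (cs : List Char) (pos : Nat) (d : Int) : Nat × Int :=
  if h : pos < cs.length ∧ 0 < d then
    pvScanA cs (pos + 1)
      (if cs[pos]'h.1 = '{' then d + 1 else if cs[pos]'h.1 = '}' then d - 1 else d)
  else (pos, d)
termination_by cs.length - pos

-- outer 'while True' of A, with fuel as a totality guard (cursore strictly increases
-- on each kept match and stays ≤ len, so len+1 iterations always suffice)
def pvOuterA (fuel : Nat) (cs kw : List Char) (cursore : Nat) : List String :=
  match fuel with
  | 0 => []
  | fuel + 1 =>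
    let si := PySem.Chars.findFrom cs kw ((cursore : Nat) : Int) none
    if si = -1 then []
    else
      let cst := si.toNat + kw.length
      let r := pvScanA cs cst 1
      if r.2 = 0 then
        -- riga[cst : r.1-1]: here 0 ≤ cst ≤ r.1-1, so the slice is exactly drop/take
        String.ofList ((cs.drop cst).take (r.1 - 1 - cst)) :: pvOuterA fuel cs kw r.1
      else []

def estrai_contenuto_graffe (riga : String) (start_keyword : String) : List String :=
  let kw := PySem.Str.replace start_keyword "\\" ""
  pvOuterA (riga.toList.length + 1) riga.toList kw.toList 0

-- ===== PORT B =====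
-- backward preprocessing pass of Source B: processes indices j-1, …, 0; at each step q is the
-- running relative depth at boundary j, 'nearest' maps a relative depth to the smallest
-- index to the right at which it occurs, acc already holds the entries for indices j…n
def pvBuildB (cs : List Char) : Nat → Int → PySem.Dict Int Nat → List (Option Nat) → List (Option Nat)
  | 0, _, _, acc => acc
  | j + 1, q, nearest, acc =>
      let nearest' := nearest.insert q j
      let ch := cs.getD j ' '          -- riga[j], always in range here
      let qj := if ch = '{' then q - 1 else if ch = '}' then q + 1 else q
      pvBuildB cs j qj nearest' ((nearest'.get? (qj - 1)) :: acc)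

-- main 'while True' of Source B (same fuel bound as A's: cursore strictly increases)
def pvMainB (fuel : Nat) (cs kw : List Char) (close_at : List (Option Nat)) (cursore : Nat) : List String :=
  match fuel with
  | 0 => []
  | fuel + 1 =>
    let si := PySem.Chars.findFrom cs kw ((cursore : Nat) : Int) none
    if si = -1 then []
    else
      let cst := si.toNat + kw.length
      match close_at.getD cst none with
      | none => []
      | some j =>
          -- riga[cst : j]: 0 ≤ cst ≤ j, slice is exactly drop/take
          String.ofList ((cs.drop cst).take (j - cst)) :: pvMainB fuel cs kw close_at (j + 1)

def estrai_contenuto_graffe_alt (riga : String) (start_keyword : String) : List String :=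
  let kw := PySem.Str.replace start_keyword "\\" ""
  let n := riga.toList.length
  let close_at := pvBuildB riga.toList n 0 PySem.Dict.empty [none]
  pvMainB (n + 1) riga.toList kw.toList close_at 0

-- ===== PRECONDITION & SPEC =====
def Spec_estrai_contenuto_graffe (riga : String) (start_keyword : String) (out : List String) : Prop := out = estrai_contenuto_graffe_alt riga start_keyword
instance (riga : String) (start_keyword : String) (out : List String) : Decidable (Spec_estrai_contenuto_graffe riga start_keyword out) := by unfold Spec_estrai_contenuto_graffe; infer_instance

-- ===== CLAIM =====
def Claim_equal_estrai_contenuto_graffe : Prop := ∀ (riga : String) (start_keyword : String), Dom_estrai_contenuto_graffe riga start_keyword → Spec_estrai_contenuto_graffe riga start_keyword (estrai_contenuto_graffe riga start_keyword)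

-- ===== LEMMAS AND PROOFS =====

-- signed brace delta of one character, and the prefix-depth function
def pvDelta (c : Char) : Int := if c = '{' then 1 else if c = '}' then -1 else 0
def pvPref (cs : List Char) (q : Nat) : Int := ((cs.take q).map pvDelta).sum

-- first index q in [j, n) with pvPref cs (q+1) = t
def pvFirst (cs : List Char) (t : Int) (j : Nat) : Option Nat :=
  if h : j < cs.length then
    if pvPref cs (j + 1) = t then some j else pvFirst cs t (j + 1)
  else none
termination_by cs.length - j

lemma pvPref_succ (cs : List Char) (j : Nat) (h : j < cs.length) :
    pvPref cs (j + 1) = pvPref cs j + pvDelta (cs[j]'h) := by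
  unfold pvPref
  rw [List.map_take, List.map_take, List.sum_take_succ _ j (by simpa using h)]
  simp

lemma pvFirst_bounds (cs : List Char) (t : Int) (j : Nat) :
    ∀ q, pvFirst cs t j = some q → j ≤ q ∧ q < cs.length := by
  fun_induction pvFirst cs t j with
  | case1 j h hp => intro q hq; simp at hq; omega
  | case2 j h hp ih => intro q hq; have := ih q hq; omega
  | case3 j h => intro q hq; exact absurd hq (by simp)

lemma pvFirst_none_spec (cs : List Char) (t : Int) (n : Nat) : ∀ j, cs.length - j ≤ n →
    pvFirst cs t j = none → ∀ r, j ≤ r → r < cs.length → pvPref cs (r + 1) ≠ t := by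
  induction n with
  | zero => intro j hn hq r hr1 hr2; omega
  | succ n ih =>
      intro j hn hq r hr1 hr2
      have hlt : j < cs.length := by omega
      rw [pvFirst, dif_pos hlt] at hq
      by_cases hpe : pvPref cs (j + 1) = t
      · rw [if_pos hpe] at hq; simp at hq
      · rw [if_neg hpe] at hq
        by_cases hre : r = j
        · subst hre; exact hpe
        · exact ih (j + 1) (by omega) hq r (by omega) hr2

-- A's inner scan, characterised by pvFirst (the first index where the depth hits 0)
lemma pvScanA_first (cs : List Char) (n : Nat) : ∀ (pos : Nat) (d : Int),
    cs.length - pos ≤ n → pos ≤ cs.length → 1 ≤ d →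
    (∀ q, pvFirst cs (pvPref cs pos - d) pos = some q → pvScanA cs pos d = (q + 1, 0)) ∧
    (pvFirst cs (pvPref cs pos - d) pos = none →
      pvScanA cs pos d = (cs.length, d + (pvPref cs cs.length - pvPref cs pos))) := by
  induction n with
  | zero =>
      intro pos d hn hp hd
      have hpos : pos = cs.length := by omega
      subst hpos
      rw [pvScanA, dif_neg (by omega), pvFirst, dif_neg (by omega)]
      refine ⟨fun q hq => absurd hq (by simp), fun _ => ?_⟩
      have : d + (pvPref cs cs.length - pvPref cs cs.length) = d := by ring
      rw [this]
  | succ n ih =>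
      intro pos d hn hp hd
      by_cases hlt : pos < cs.length
      · rw [pvScanA, dif_pos ⟨hlt, by omega⟩]
        set d' : Int := if cs[pos]'hlt = '{' then d + 1 else if cs[pos]'hlt = '}' then d - 1 else d
          with hd'
        have hstep : pvPref cs (pos + 1) = pvPref cs pos - d + d' := by
          rw [pvPref_succ cs pos hlt, hd']
          unfold pvDelta; split_ifs <;> ring
        constructor
        · intro q hq
          rw [pvFirst, dif_pos hlt] at hq
          by_cases hz : d' = 0
          · rw [if_pos (by omega)] at hq
            have hqe : q = pos := by simpa using hq.symm
            subst hqe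
            rw [hz, pvScanA, dif_neg (by omega)]
          · have hd1 : 1 ≤ d' := by
              rw [hd'] at hz ⊢; split_ifs at hz ⊢ <;> omega
            rw [if_neg (by omega)] at hq
            have ht : pvPref cs (pos + 1) - d' = pvPref cs pos - d := by omega
            exact (ih (pos + 1) d' (by omega) (by omega) hd1).1 q (by rw [ht]; exact hq)
        · intro hq
          rw [pvFirst, dif_pos hlt] at hq
          by_cases hz : d' = 0
          · rw [if_pos (by omega)] at hq; simp at hq
          · have hd1 : 1 ≤ d' := by
              rw [hd'] at hz ⊢; split_ifs at hz ⊢ <;> omega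
            rw [if_neg (by omega)] at hq
            have ht : pvPref cs (pos + 1) - d' = pvPref cs pos - d := by omega
            rw [(ih (pos + 1) d' (by omega) (by omega) hd1).2 (by rw [ht]; exact hq)]
            have : d' + (pvPref cs cs.length - pvPref cs (pos + 1)) =
                d + (pvPref cs cs.length - pvPref cs pos) := by omega
            rw [this]
      · have hpos : pos = cs.length := by omega
        subst hpos
        rw [pvScanA, dif_neg (by omega), pvFirst, dif_neg (by omega)]
        refine ⟨fun q hq => absurd hq (by simp), fun _ => ?_⟩
        have : d + (pvPref cs cs.length - pvPref cs cs.length) = d := by ring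
        rw [this]

-- the dictionary invariant carried by the backward pass, and the table it produces
lemma pvBuildB_spec (cs : List Char) : ∀ (j : Nat), j ≤ cs.length →
    ∀ (nearest : PySem.Dict Int Nat) (acc : List (Option Nat)),
    (∀ v : Int, nearest.get? v = pvFirst cs (v + pvPref cs cs.length) j) →
    pvBuildB cs j (pvPref cs j - pvPref cs cs.length) nearest acc =
      (List.range j).map (fun i => pvFirst cs (pvPref cs i - 1) i) ++ acc := by
  intro j
  induction j with
  | zero => intro _ nearest acc _; simp [pvBuildB]
  | succ j ih =>
      intro hj nearest acc hinv
      have hlt : j < cs.length := by omega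
      rw [pvBuildB]
      set nearest' := nearest.insert (pvPref cs (j + 1) - pvPref cs cs.length) j with hn'
      have hch : cs.getD j ' ' = cs[j]'hlt := by
        rw [List.getD_eq_getElem?_getD, List.getElem?_eq_getElem hlt]; rfl
      have hqj : (if cs.getD j ' ' = '{' then pvPref cs (j + 1) - pvPref cs cs.length - 1
          else if cs.getD j ' ' = '}' then pvPref cs (j + 1) - pvPref cs cs.length + 1
          else pvPref cs (j + 1) - pvPref cs cs.length) = pvPref cs j - pvPref cs cs.length := by
        rw [hch, pvPref_succ cs j hlt]
        unfold pvDelta; split_ifs <;> ring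
      have hinv' : ∀ v : Int, nearest'.get? v = pvFirst cs (v + pvPref cs cs.length) j := by
        intro v
        rw [hn', PySem.Dict.get?_insert]
        rw [pvFirst, dif_pos hlt]
        by_cases hv : v = pvPref cs (j + 1) - pvPref cs cs.length
        · rw [if_pos hv, if_pos (by rw [hv]; ring)]
        · rw [if_neg hv, if_neg (by intro hc; apply hv; omega), hinv v]
      rw [hqj, ih (by omega) nearest' _ hinv']
      have hget : nearest'.get? (pvPref cs j - pvPref cs cs.length - 1) =
          pvFirst cs (pvPref cs j - 1) j := by
        rw [hinv' (pvPref cs j - pvPref cs cs.length - 1)]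
        congr 1; ring
      rw [hget, List.range_succ]
      simp

-- the produced table, elementwise
lemma pvBuildB_getD (cs : List Char) (i : Nat) (hi : i ≤ cs.length) :
    (pvBuildB cs cs.length 0 PySem.Dict.empty [none]).getD i none =
      if _h : i < cs.length then pvFirst cs (pvPref cs i - 1) i else none := by
  have h0 : (0 : Int) = pvPref cs cs.length - pvPref cs cs.length := by ring
  have hinv : ∀ v : Int, (PySem.Dict.empty : PySem.Dict Int Nat).get? v =
      pvFirst cs (v + pvPref cs cs.length) cs.length := by
    intro v; rw [pvFirst, dif_neg (by omega)]; simp [PySem.Dict.get?_empty]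
  rw [h0, pvBuildB_spec cs cs.length le_rfl PySem.Dict.empty [none] hinv]
  by_cases h : i < cs.length
  · rw [dif_pos h, List.getD_append _ _ _ _ (by simp; omega)]
    simp [List.getD_eq_getElem?_getD, h]
  · have hie : i = cs.length := by omega
    subst hie
    rw [dif_neg (by omega), List.getD_eq_getElem?_getD,
      List.getElem?_append_right (by simp)]
    simp

-- the two main loops agree step by step
lemma pvMainAB (cs kw : List Char) : ∀ (fuel : Nat) (c : Nat), c ≤ cs.length →
    pvOuterA fuel cs kw c = pvMainB fuel cs kw (pvBuildB cs cs.length 0 PySem.Dict.empty [none]) c := by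
  intro fuel
  induction fuel with
  | zero => intro c _; rfl
  | succ fuel ih =>
      intro c hc
      rw [pvOuterA, pvMainB]
      simp only []
      by_cases hsi : PySem.Chars.findFrom cs kw ((c : Nat) : Int) none = -1
      · rw [if_pos hsi, if_pos hsi]
      · rw [if_neg hsi, if_neg hsi]
        obtain ⟨h1, h2, _⟩ := PySem.Chars.findFrom_natCast_spec cs kw c hc hsi
        set si := PySem.Chars.findFrom cs kw ((c : Nat) : Int) none with hsidef
        have hjlen : si.toNat + kw.length ≤ cs.length := by
          rcases List.eq_nil_or_concat kw with hkw | ⟨_, _, hkw⟩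
          · subst hkw
            have : si = (c : Int) := by
              rw [hsidef, PySem.Chars.findFrom_natCast cs [] c hc, PySem.Chars.find_nil]
              simp
            simp [this]; omega
          · have hlen := h2.length_le
            rw [List.length_drop] at hlen
            have : 0 < kw.length := by subst hkw; simp
            omega
        set cst := si.toNat + kw.length with hcst
        by_cases hlt : cst < cs.length
        · cases hfe : pvFirst cs (pvPref cs cst - 1) cst with
          | none =>
              have hne : pvPref cs cs.length ≠ pvPref cs cst - 1 := by
                intro hcon
                refine pvFirst_none_spec cs (pvPref cs cst - 1) cs.length cst (by omega) hfe
                  (cs.length - 1) (by omega) (by omega) ?_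
                rw [show cs.length - 1 + 1 = cs.length by omega, hcon]
              have hscan : pvScanA cs cst 1 =
                  (cs.length, 1 + (pvPref cs cs.length - pvPref cs cst)) :=
                (pvScanA_first cs cs.length cst 1 (by omega) hjlen le_rfl).2
                  (by rw [show pvPref cs cst - 1 = pvPref cs cst - 1 from rfl]; exact hfe)
              rw [hscan]
              rw [if_neg (show ¬ ((cs.length, 1 + (pvPref cs cs.length - pvPref cs cst)) :
                Nat × Int).2 = 0 from by
                  show ¬ (1 + (pvPref cs cs.length - pvPref cs cst) = 0); omega)]
              rw [pvBuildB_getD cs cst hjlen, dif_pos hlt, hfe]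
          | some q =>
              have hscan : pvScanA cs cst 1 = (q + 1, 0) :=
                (pvScanA_first cs cs.length cst 1 (by omega) hjlen le_rfl).1 q hfe
              obtain ⟨hb1, hb2⟩ := pvFirst_bounds cs (pvPref cs cst - 1) cst q hfe
              rw [hscan]
              rw [if_pos (rfl : (((q + 1 : Nat), (0 : Int))).2 = 0)]
              rw [show (((q + 1 : Nat), (0 : Int))).1 = q + 1 from rfl]
              rw [show q + 1 - 1 - cst = q - cst from by omega]
              rw [ih (q + 1) (by omega)]
              rw [pvBuildB_getD cs cst hjlen, dif_pos hlt, hfe]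
        · have hcl : cst = cs.length := by omega
          have hscan : pvScanA cs cst 1 = (cst, 1) := by
            rw [pvScanA, dif_neg (by omega)]
          rw [hscan]
          rw [if_neg (show ¬ (((cst, (1 : Int))).2 = 0) from by
            show ¬ ((1 : Int) = 0); norm_num)]
          rw [pvBuildB_getD cs cst hjlen, dif_neg hlt]

-- ===== VERDICT =====
theorem estrai_contenuto_graffe_spec : Claim_equal_estrai_contenuto_graffe := by
  intro riga start_keyword _
  unfold Spec_estrai_contenuto_graffe estrai_contenuto_graffe estrai_contenuto_graffe_alt
  exact pvMainAB riga.toList (PySem.Str.replace start_keyword "\\" "").toList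
    (riga.toList.length + 1) 0 (by omega)
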